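-- pv_equiv track=rewrite | github.com/connornmfinlay/python | school-projects/Member's Program/Member's Program.py | counting_occurrences
-- ===== SOURCE A (Python) =====
-- def counting_occurrences(c_array, f_array):
--     length = len(c_array)
--     a_count = 0
--     j_count = 0
--     s_count = 0
--     t_count = 0
--     for counter in range(0, length):
--         if c_array[counter] == "Adult" or c_array[counter] == "adult":
--             a_count = a_count + 1
--
--         elif c_array[counter] == "Junior" or c_array[counter] == "junior":
--             j_count = j_count + 1
--
--         elif c_array[counter] == "Senior" or c_array[counter] == "senior":
--             s_count = s_count + 1
--
--     t_count = t_count + a_count + j_count + s_count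
--
--     return a_count, j_count, s_count, t_count
-- ===== SOURCE B (Python) =====
-- def counting_occurrences(c_array, f_array):
--     a_count = c_array.count("Adult") + c_array.count("adult")
--     j_count = c_array.count("Junior") + c_array.count("junior")
--     s_count = c_array.count("Senior") + c_array.count("senior")
--     return a_count, j_count, s_count, a_count + j_count + s_count
-- ===== Notes on version B (the rewrite author's own statement) =====
-- stated objective: idiomatic
-- what changed: Replaced the index-driven branching loop and four running accumulators with keyed list.count reads per label (six count calls) and a sum for the total.
import Mathlib
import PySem

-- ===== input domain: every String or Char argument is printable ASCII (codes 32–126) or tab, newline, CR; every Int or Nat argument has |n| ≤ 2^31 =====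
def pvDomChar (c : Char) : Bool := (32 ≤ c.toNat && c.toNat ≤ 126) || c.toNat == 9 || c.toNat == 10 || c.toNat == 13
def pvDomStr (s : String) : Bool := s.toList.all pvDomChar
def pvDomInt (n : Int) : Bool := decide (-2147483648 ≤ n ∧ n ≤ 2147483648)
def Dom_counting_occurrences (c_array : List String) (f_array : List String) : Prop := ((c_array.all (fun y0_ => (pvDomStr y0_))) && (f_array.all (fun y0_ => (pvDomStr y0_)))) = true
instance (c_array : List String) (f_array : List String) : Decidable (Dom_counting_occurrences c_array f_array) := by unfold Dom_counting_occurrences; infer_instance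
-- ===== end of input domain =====

-- B replaces the index-driven branching loop by keyed list.count reads per label; return value only, f_array unused by both.
-- ===== PORT A =====
def counting_occurrences (c_array : List String) (f_array : List String) : Int × Int × Int × Int :=
  let length : Int := c_array.length
  let st : Int × Int × Int :=
    (PySem.List.pyRange 0 length 1).foldl
      (fun (acc : Int × Int × Int) counter =>
        let x := PySem.List.pyGetD c_array counter ""
        if x = "Adult" ∨ x = "adult" then (acc.1 + 1, acc.2.1, acc.2.2)
        else if x = "Junior" ∨ x = "junior" then (acc.1, acc.2.1 + 1, acc.2.2)
        else if x = "Senior" ∨ x = "senior" then (acc.1, acc.2.1, acc.2.2 + 1)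
        else acc)
      (0, 0, 0)
  let t_count : Int := 0 + st.1 + st.2.1 + st.2.2
  (st.1, st.2.1, st.2.2, t_count)

-- ===== PORT B =====
def counting_occurrences_alt (c_array : List String) (f_array : List String) : Int × Int × Int × Int :=
  let a_count : Int := PySem.List.count c_array "Adult" + PySem.List.count c_array "adult"
  let j_count : Int := PySem.List.count c_array "Junior" + PySem.List.count c_array "junior"
  let s_count : Int := PySem.List.count c_array "Senior" + PySem.List.count c_array "senior"
  (a_count, j_count, s_count, a_count + j_count + s_count)

-- ===== PRECONDITION & SPEC =====
def Spec_counting_occurrences (c_array : List String) (f_array : List String) (out : Int × Int × Int × Int) : Prop := out = counting_occurrences_alt c_array f_array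
instance (c_array : List String) (f_array : List String) (out : Int × Int × Int × Int) : Decidable (Spec_counting_occurrences c_array f_array out) := by unfold Spec_counting_occurrences; infer_instance

-- ===== CLAIM (what is proved, stated in full; the proofs are below) =====
def Claim_equal_counting_occurrences : Prop := ∀ (c_array : List String) (f_array : List String), Dom_counting_occurrences c_array f_array → Spec_counting_occurrences c_array f_array (counting_occurrences c_array f_array)

-- ===== LEMMAS AND PROOFS =====

-- ===== VERDICT (by name: the statement is the Claim_ definition above) =====
lemma loop_eq (xs : List String) (a j s : Int) :
    xs.foldl
      (fun (acc : Int × Int × Int) x =>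
        if x = "Adult" ∨ x = "adult" then (acc.1 + 1, acc.2.1, acc.2.2)
        else if x = "Junior" ∨ x = "junior" then (acc.1, acc.2.1 + 1, acc.2.2)
        else if x = "Senior" ∨ x = "senior" then (acc.1, acc.2.1, acc.2.2 + 1)
        else acc)
      (a, j, s)
    = (a + (xs.count "Adult" : Int) + xs.count "adult",
       j + (xs.count "Junior" : Int) + xs.count "junior",
       s + (xs.count "Senior" : Int) + xs.count "senior") := by
  induction xs generalizing a j s with
  | nil => simp
  | cons x xs ih =>
    simp only [List.foldl_cons]
    split_ifs with h1 h2 h3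
    · rcases h1 with h | h <;> subst h <;> rw [ih] <;>
        simp [Prod.ext_iff] <;> omega
    · rcases h2 with h | h <;> subst h <;> rw [ih] <;>
        simp [Prod.ext_iff] <;> omega
    · rcases h3 with h | h <;> subst h <;> rw [ih] <;>
        simp [Prod.ext_iff] <;> omega
    · rw [ih]
      have e : ∀ v : String, v ≠ x → (x :: xs).count v = xs.count v := by
        intro v hv; simp [Ne.symm hv]
      push Not at h1 h2 h3
      rw [e _ (Ne.symm h1.1), e _ (Ne.symm h1.2), e _ (Ne.symm h2.1),
          e _ (Ne.symm h2.2), e _ (Ne.symm h3.1), e _ (Ne.symm h3.2)]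

-- ===== VERDICT (by name: the statement is the Claim_ definition above) =====
theorem counting_occurrences_spec : Claim_equal_counting_occurrences := by
  intro c f _
  simp only [Spec_counting_occurrences, counting_occurrences, counting_occurrences_alt]
  rw [PySem.List.foldl_pyRange_zero_pyGetD' c ""
        (fun (acc : Int × Int × Int) x =>
          if x = "Adult" ∨ x = "adult" then (acc.1 + 1, acc.2.1, acc.2.2)
          else if x = "Junior" ∨ x = "junior" then (acc.1, acc.2.1 + 1, acc.2.2)
          else if x = "Senior" ∨ x = "senior" then (acc.1, acc.2.1, acc.2.2 + 1)
          else acc)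
        (0, 0, 0)]
  rw [loop_eq]
  simp [PySem.List.count_eq]
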